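-- pv_equiv track=rewrite | github.com/Ydarp/projet_rolit | jeu.py | compte_couleur
-- ===== SOURCE A (Python) =====
-- def compte_couleur(t: list,bonus: list) -> dict:
--     """Compte le nombre de pion de chaque couleur actuellement en jeu.
--
--     Args:
--         t (list): tableau a double entrée
--         bonus (list): liste des couleurs bonus
--     Returns:
--         compteur (dict): nombre de fois que chaque couleur apparait dans t
--     """
--     compteur  = {'R': 0, 'J': 0, 'V': 0,'B': 0}
--     for i in range(len(t)):
--         for j in range(len(t)):
--             if t[i][j] in compteur:
--                 if (i,j) in bonus:
--                     compteur[t[i][j]] += 5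
--                 else:
--                     compteur[t[i][j]] += 1
--     return compteur
-- ===== SOURCE B (Python) =====
-- def compte_couleur(t: list, bonus: list) -> dict:
--     """Two-pass reimplementation: base count over the n x n square, then +4
--     for each distinct in-square bonus cell holding a countable colour."""
--     n = len(t)
--     compteur = {'R': 0, 'J': 0, 'V': 0, 'B': 0}
--     for row in t:
--         for cell in row[:n]:
--             if cell in compteur:
--                 compteur[cell] += 1
--     for (i, j) in dict.fromkeys(bonus):
--         if 0 <= i < n and 0 <= j < n:
--             cell = t[i][j]
--             if cell in compteur:
--                 compteur[cell] += 4
--     return compteur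
-- ===== Notes on version B (the rewrite author's own statement) =====
-- stated objective: alternative
-- what changed: A tests '(i,j) in bonus' (a linear scan of bonus) inside the per-cell double loop; B makes one base-count pass over the n x n square ignoring bonus, then a second pass over the deduplicated bonus list adding +4 for each in-square bonus cell holding a countable colour.
import Mathlib
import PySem

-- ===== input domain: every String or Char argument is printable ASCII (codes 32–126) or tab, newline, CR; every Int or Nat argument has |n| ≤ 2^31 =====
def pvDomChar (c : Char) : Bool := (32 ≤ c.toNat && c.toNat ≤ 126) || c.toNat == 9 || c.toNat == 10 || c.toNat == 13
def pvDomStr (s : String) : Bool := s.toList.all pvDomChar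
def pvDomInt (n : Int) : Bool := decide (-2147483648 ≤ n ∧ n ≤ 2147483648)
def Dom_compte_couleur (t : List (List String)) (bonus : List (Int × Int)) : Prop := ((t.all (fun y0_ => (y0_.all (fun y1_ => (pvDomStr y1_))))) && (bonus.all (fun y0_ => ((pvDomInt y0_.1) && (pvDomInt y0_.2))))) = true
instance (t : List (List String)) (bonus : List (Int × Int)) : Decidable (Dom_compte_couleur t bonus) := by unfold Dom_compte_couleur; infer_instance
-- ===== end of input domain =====

-- B replaces A's per-cell linear scan of `bonus` by a base-count pass over the square
-- plus one pass over the deduplicated bonus list adding +4 per in-square countable cell.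

-- ===== PORT A =====
def compte_couleur (t : List (List String)) (bonus : List (Int × Int)) : List (String × Int) :=
  let compteur : PySem.Dict String Int :=
    PySem.Dict.ofList [("R", 0), ("J", 0), ("V", 0), ("B", 0)]
  let n : Int := (t.length : Int)
  ((PySem.List.pyRange 0 n 1).foldl (fun d i =>
    (PySem.List.pyRange 0 n 1).foldl (fun d j =>
      let cell := PySem.List.pyGetD (PySem.List.pyGetD t i []) j ""
      if d.contains cell then
        if bonus.contains (i, j) then d.modify cell 0 (· + 5)
        else d.modify cell 0 (· + 1)
      else d) d) compteur).items

-- ===== PORT B =====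
def compte_couleur_alt (t : List (List String)) (bonus : List (Int × Int)) : List (String × Int) :=
  let n : Int := (t.length : Int)
  let d0 : PySem.Dict String Int :=
    PySem.Dict.ofList [("R", 0), ("J", 0), ("V", 0), ("B", 0)]
  let base := t.foldl (fun d row =>
      (PySem.List.slice row (some 0) (some n)).foldl (fun d cell =>
        if d.contains cell then d.modify cell 0 (· + 1) else d) d) d0
  let final := (PySem.List.dedup bonus).foldl (fun d ij =>
      if 0 ≤ ij.1 ∧ ij.1 < n ∧ 0 ≤ ij.2 ∧ ij.2 < n then
        let cell := PySem.List.pyGetD (PySem.List.pyGetD t ij.1 []) ij.2 ""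
        if d.contains cell then d.modify cell 0 (· + 4) else d
      else d) base
  final.items

-- ===== PRECONDITION & SPEC =====
-- Pre_ excludes exactly the inputs where A raises IndexError: some row of t is
-- shorter than len(t), so t[i][j] with j < len(t) goes out of range.
def Pre_compte_couleur (t : List (List String)) (bonus : List (Int × Int)) : Prop :=
  ∀ row ∈ t, t.length ≤ row.length
instance (t : List (List String)) (bonus : List (Int × Int)) : Decidable (Pre_compte_couleur t bonus) := by unfold Pre_compte_couleur; infer_instance

def pvWitness_compte_couleur : List (List String) × (List (Int × Int)) :=
  ([["R", "x"], ["B", "J"]], [(0, 0), (5, 5), (0, 0)])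

def Spec_compte_couleur (t : List (List String)) (bonus : List (Int × Int)) (out : List (String × Int)) : Prop := out = compte_couleur_alt t bonus
instance (t : List (List String)) (bonus : List (Int × Int)) (out : List (String × Int)) : Decidable (Spec_compte_couleur t bonus out) := by unfold Spec_compte_couleur; infer_instance

-- ===== CLAIM (what is proved, stated in full; the proofs are below) =====
def Claim_equal_compte_couleur : Prop := ∀ (t : List (List String)) (bonus : List (Int × Int)), Dom_compte_couleur t bonus → Pre_compte_couleur t bonus → Spec_compte_couleur t bonus (compte_couleur t bonus)

-- ===== LEMMAS AND PROOFS =====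

-- The common loop shape of both ports: a guarded counter bump.
def pvStep {α : Type} (g : α → Bool) (key : α → String) (w : α → Int)
    (d : PySem.Dict String Int) (x : α) : PySem.Dict String Int :=
  if g x then
    (if d.contains (key x) then d.modify (key x) 0 (fun v => v + w x) else d)
  else d

def pvD0 : PySem.Dict String Int := PySem.Dict.ofList [("R", 0), ("J", 0), ("V", 0), ("B", 0)]

def pvCell (t : List (List String)) (p : Int × Int) : String :=
  PySem.List.pyGetD (PySem.List.pyGetD t p.1 []) p.2 ""

def pvWA (bonus : List (Int × Int)) (p : Int × Int) : Int :=
  if bonus.contains p then 5 else 1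

def pvG (n : Int) (p : Int × Int) : Bool :=
  decide (0 ≤ p.1 ∧ p.1 < n ∧ 0 ≤ p.2 ∧ p.2 < n)

def pvPairs (t : List (List String)) : List (Int × Int) :=
  PySem.List.pyRange 0 (t.length : Int) 1 ×ˢ PySem.List.pyRange 0 (t.length : Int) 1

theorem pvStep_contains {α : Type} (g : α → Bool) (key : α → String) (w : α → Int)
    (d : PySem.Dict String Int) (x : α) (c : String) :
    (pvStep g key w d x).contains c = d.contains c := by
  unfold pvStep
  split_ifs with h1 h2
  · rw [PySem.Dict.contains_modify]
    by_cases hc : c = key x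
    · subst hc; simp [h2]
    · simp [hc]
  · rfl
  · rfl

theorem pvStep_keys {α : Type} (g : α → Bool) (key : α → String) (w : α → Int)
    (d : PySem.Dict String Int) (x : α) :
    (pvStep g key w d x).keys = d.keys := by
  unfold pvStep
  split_ifs with h1 h2
  · rw [PySem.Dict.keys_modify, PySem.Dict.keys_insert_of_contains _ _ h2]
  · rfl
  · rfl

theorem pvFoldl_keys {α : Type} (g : α → Bool) (key : α → String) (w : α → Int)
    (l : List α) (d : PySem.Dict String Int) :
    (l.foldl (pvStep g key w) d).keys = d.keys := by
  induction l generalizing d with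
  | nil => rfl
  | cons x l ih => simp [List.foldl_cons, ih, pvStep_keys]

theorem pvFoldl_contains {α : Type} (g : α → Bool) (key : α → String) (w : α → Int)
    (l : List α) (d : PySem.Dict String Int) (c : String) :
    (l.foldl (pvStep g key w) d).contains c = d.contains c := by
  induction l generalizing d with
  | nil => rfl
  | cons x l ih => simp [List.foldl_cons, ih, pvStep_contains]

theorem pvFoldl_getD {α : Type} (g : α → Bool) (key : α → String) (w : α → Int)
    (l : List α) (d : PySem.Dict String Int) (c : String) (hc : d.contains c = true) :
    (l.foldl (pvStep g key w) d).getD c 0 =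
      d.getD c 0 + ((l.filter (fun x => g x && (key x == c))).map w).sum := by
  induction l generalizing d with
  | nil => simp
  | cons x l ih =>
      rw [List.foldl_cons, ih _ (by rw [pvStep_contains]; exact hc)]
      have hstep : (pvStep g key w d x).getD c 0 =
          d.getD c 0 + (if g x && (key x == c) then w x else 0) := by
        unfold pvStep
        by_cases h1 : g x = true
        · rw [if_pos h1]
          by_cases hk : key x = c
          · have h2 : d.contains (key x) = true := by rw [hk]; exact hc
            rw [if_pos h2, PySem.Dict.getD_modify, if_pos hk.symm, hk]
            simp [h1]
          · have hne : (key x == c) = false := beq_eq_false_iff_ne.mpr hk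
            by_cases h2 : d.contains (key x) = true
            · rw [if_pos h2, PySem.Dict.getD_modify,
                if_neg (fun h => hk h.symm)]
              simp [hne]
            · rw [if_neg h2]
              simp [hne]
        · rw [if_neg h1]
          simp [h1]
      rw [hstep, List.filter_cons]
      by_cases hgx : (g x && (key x == c)) = true
      · simp [hgx]; ring
      · simp [hgx]

-- flatten two nested loops into one loop over the product list
theorem pvFoldl_nested {σ : Type} (l1 l2 : List Int) (G : σ → Int → Int → σ) (init : σ) :
    l1.foldl (fun s i => l2.foldl (fun s j => G s i j) s) init
      = (l1 ×ˢ l2).foldl (fun s p => G s p.1 p.2) init := by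
  induction l1 generalizing init with
  | nil => rfl
  | cons a l ih =>
      simp only [List.foldl_cons, SProd.sprod, List.product, List.flatMap_cons,
        List.foldl_append, List.foldl_map, ih]

-- flatten a loop over rows with an inner loop over cells
theorem pvFoldl_rows {α β σ : Type} (t : List α) (f : α → List β) (F : σ → β → σ) (init : σ) :
    t.foldl (fun s a => (f a).foldl F s) init = (t.flatMap f).foldl F init := by
  induction t generalizing init with
  | nil => rfl
  | cons r t ih => simp [List.foldl_cons, List.foldl_append, ih]

-- for 0 ≤ j < n the j-loop over a row of length ≥ n reads exactly row.take n
theorem pvTake_map (row : List String) (n : Nat) (h : n ≤ row.length) :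
    (PySem.List.pyRange 0 (n : Int) 1).map (fun j => PySem.List.pyGetD row j "") = row.take n := by
  rw [PySem.List.pyRange_one]
  simp only [Int.sub_zero, Int.toNat_natCast, List.map_map]
  apply List.ext_getElem
  · simp [h]
  · intro i h1 h2
    simp only [List.getElem_map, List.getElem_range, Function.comp_apply, List.getElem_take]
    rw [PySem.List.pyGetD_of_nonneg _ _ (by positivity)]
    simp only [List.length_map, List.length_range] at h1
    rw [List.getD_eq_getElem _ _ (by simpa using lt_of_lt_of_le h1 h)]
    simp

theorem pv_sum_wA (bonus : List (Int × Int)) (L : List (Int × Int)) :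
    (L.map (pvWA bonus)).sum
      = (L.length : Int) + 4 * (L.countP (fun p => bonus.contains p) : Int) := by
  induction L with
  | nil => simp
  | cons x L ih =>
      simp only [List.map_cons, List.sum_cons, ih, List.countP_cons, List.length_cons, pvWA]
      split_ifs with h <;> simp <;> ring

theorem pvA_eq (t : List (List String)) (bonus : List (Int × Int)) :
    compte_couleur t bonus =
      ((pvPairs t).foldl (pvStep (fun _ => true) (pvCell t) (pvWA bonus)) pvD0).items := by
  unfold compte_couleur pvPairs pvD0
  dsimp only
  rw [pvFoldl_nested]
  congr 1
  apply List.foldl_ext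
  intro d p _
  obtain ⟨i, j⟩ := p
  simp only [pvStep, pvCell, pvWA]
  by_cases hb : (i, j) ∈ bonus
  · simp [hb]
  · simp [hb]

theorem pvB_eq (t : List (List String)) (bonus : List (Int × Int)) :
    compte_couleur_alt t bonus =
      ((PySem.List.dedup bonus).foldl (pvStep (pvG (t.length : Int)) (pvCell t) (fun _ => 4))
        ((t.flatMap (fun row => row.take t.length)).foldl
          (pvStep (fun _ => true) (fun s => s) (fun _ => 1)) pvD0)).items := by
  unfold compte_couleur_alt pvD0
  dsimp only
  have hslice : ∀ row : List String,
      PySem.List.slice row (some 0) (some (t.length : Int)) = row.take t.length := by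
    intro row
    rw [PySem.List.slice_zero_start, PySem.List.slice_to _ (by positivity)]
    simp
  simp only [hslice]
  rw [pvFoldl_rows]
  have hbase : (t.flatMap (fun row => row.take t.length)).foldl
      (fun d cell => if d.contains cell = true then d.modify cell 0 (· + 1) else d)
      (PySem.Dict.ofList [("R", 0), ("J", 0), ("V", 0), ("B", 0)])
      = (t.flatMap (fun row => row.take t.length)).foldl
        (pvStep (fun _ => true) (fun s => s) (fun _ => 1))
        (PySem.Dict.ofList [("R", 0), ("J", 0), ("V", 0), ("B", 0)]) := by
    apply List.foldl_ext
    intro d cell _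
    simp [pvStep]
  rw [hbase]
  congr 1
  apply List.foldl_ext
  intro d p _
  obtain ⟨i, j⟩ := p
  simp only [pvStep, pvG, pvCell]
  by_cases hg : 0 ≤ i ∧ i < (t.length : Int) ∧ 0 ≤ j ∧ j < (t.length : Int)
  · simp [hg]
  · simp [hg]

theorem pv_part1 (t : List (List String)) (c : String)
    (hpre : ∀ row ∈ t, t.length ≤ row.length) :
    (pvPairs t).countP (fun p => pvCell t p == c)
      = (t.flatMap (fun row => row.take t.length)).count c := by
  unfold pvPairs
  simp only [SProd.sprod, List.product]
  rw [List.countP_flatMap, List.count_flatMap]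
  conv_rhs => rw [← PySem.List.map_pyGetD_pyRange_zero' t []]
  rw [List.map_map]
  simp only [List.length_map, PySem.List.length_pyRange_one, Int.sub_zero, Int.toNat_natCast]
  apply congrArg List.sum
  apply List.map_congr_left
  intro i hi
  rw [PySem.List.mem_pyRange_one] at hi
  have hrow : PySem.List.pyGetD t i [] ∈ t := by
    have hit : i.toNat < t.length := by omega
    rw [PySem.List.pyGetD_of_nonneg _ _ hi.1, List.getD_eq_getElem _ _ hit]
    exact List.getElem_mem _
  have hlen : t.length ≤ (PySem.List.pyGetD t i []).length := hpre _ hrow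
  simp only [Function.comp_apply, List.countP_map]
  rw [← pvTake_map (PySem.List.pyGetD t i []) t.length hlen]
  rw [List.count_eq_countP, List.countP_map]
  rfl

theorem pv_part2 (t : List (List String)) (bonus : List (Int × Int)) (c : String) :
    (pvPairs t).countP (fun p => bonus.contains p && (pvCell t p == c))
      = (PySem.List.dedup bonus).countP (fun p => pvG (t.length : Int) p && (pvCell t p == c)) := by
  unfold pvPairs
  rw [List.countP_eq_length_filter, List.countP_eq_length_filter]
  apply List.Perm.length_eq
  rw [List.perm_ext_iff_of_nodup
    (List.Nodup.filter _ (List.Nodup.product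
      (PySem.List.nodup_pyRange_one _ _) (PySem.List.nodup_pyRange_one _ _)))
    (List.Nodup.filter _ (PySem.List.nodup_dedup _))]
  intro a
  obtain ⟨i, j⟩ := a
  simp only [List.mem_filter, List.mem_product, PySem.List.mem_pyRange_one,
    PySem.List.mem_dedup, pvG, Bool.and_eq_true, decide_eq_true_eq,
    List.contains_iff_mem]
  tauto

theorem pv_color (t : List (List String)) (bonus : List (Int × Int)) (c : String)
    (hpre : ∀ row ∈ t, t.length ≤ row.length) (hc : pvD0.contains c = true) :
    ((pvPairs t).foldl (pvStep (fun _ => true) (pvCell t) (pvWA bonus)) pvD0).getD c 0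
      = ((PySem.List.dedup bonus).foldl (pvStep (pvG (t.length : Int)) (pvCell t) (fun _ => 4))
          ((t.flatMap (fun row => row.take t.length)).foldl
            (pvStep (fun _ => true) (fun s => s) (fun _ => 1)) pvD0)).getD c 0 := by
  have hbase : ((t.flatMap (fun row => row.take t.length)).foldl
      (pvStep (fun _ => true) (fun s => s) (fun _ => 1)) pvD0).contains c = true := by
    rw [pvFoldl_contains]; exact hc
  rw [pvFoldl_getD _ _ _ _ _ _ hc, pvFoldl_getD _ _ _ _ _ _ hbase,
    pvFoldl_getD _ _ _ _ _ _ hc]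
  rw [pv_sum_wA]
  simp only [Bool.true_and, PySem.List.sum_map_const_int]
  rw [← List.countP_eq_length_filter, ← List.countP_eq_length_filter,
    ← List.countP_eq_length_filter]
  rw [List.countP_filter]
  rw [pv_part1 t c hpre, pv_part2 t bonus c, List.count_eq_countP]
  ring

-- ===== VERDICT (by name: the statement is the Claim_ definition above) =====
theorem compte_couleur_spec : Claim_equal_compte_couleur := by
  intro t bonus _ hpre
  unfold Spec_compte_couleur
  rw [pvA_eq, pvB_eq]
  have hkA : ((pvPairs t).foldl (pvStep (fun _ => true) (pvCell t) (pvWA bonus)) pvD0).keys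
      = pvD0.keys := pvFoldl_keys _ _ _ _ _
  have hkB : ((PySem.List.dedup bonus).foldl (pvStep (pvG (t.length : Int)) (pvCell t) (fun _ => 4))
      ((t.flatMap (fun row => row.take t.length)).foldl
        (pvStep (fun _ => true) (fun s => s) (fun _ => 1)) pvD0)).keys = pvD0.keys := by
    rw [pvFoldl_keys, pvFoldl_keys]
  rw [PySem.Dict.items_eq_map_keys _ (by rw [hkA]; decide) 0,
      PySem.Dict.items_eq_map_keys _ (by rw [hkB]; decide) 0, hkA, hkB]
  apply List.map_congr_left
  intro k hk
  have hck : pvD0.contains k = true := by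
    rw [PySem.Dict.contains_iff_mem_keys]; exact hk
  exact congrArg (fun v => (k, v)) (pv_color t bonus k hpre hck)
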